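-- pv_equiv track=rewrite | github.com/MurtyShikhar/TreeProjections | data_utils/pcfg_helpers.py | is_leaf_fn_pcfg
-- ===== SOURCE A (Python) =====
-- def is_leaf_fn_pcfg(word_list, st, en):
--     ### check if the words from st to en are a "leaf"
--     if st == en:
--         return True
--
--     def is_arg(idx, word):
--         if idx not in [0, en - st]:
--             return len(word) <= 3 and ',' not in word
--         else:
--             return len(word) <= 3
--     return all(is_arg(idx, word) for idx, word in enumerate(word_list[st:en+1]))
-- ===== SOURCE B (Python) =====
-- def is_leaf_fn_pcfg(word_list, st, en):
--     if st == en: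
--         return True
--     words = word_list[st:en+1]
--     if max(map(len, words), default=0) > 3:
--         return False
--     return {i for i, w in enumerate(words) if ',' in w} <= {0, en - st}
-- ===== Notes on version B (the rewrite author's own statement) =====
-- stated objective: alternative
-- what changed: Replaces A's single pass applying an index-aware per-word predicate by an aggregate formulation: a max() over the word lengths of the slice, then the set of positions whose word contains a comma tested for subset inclusion in the allowed set {0, en - st}.
import Mathlib
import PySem

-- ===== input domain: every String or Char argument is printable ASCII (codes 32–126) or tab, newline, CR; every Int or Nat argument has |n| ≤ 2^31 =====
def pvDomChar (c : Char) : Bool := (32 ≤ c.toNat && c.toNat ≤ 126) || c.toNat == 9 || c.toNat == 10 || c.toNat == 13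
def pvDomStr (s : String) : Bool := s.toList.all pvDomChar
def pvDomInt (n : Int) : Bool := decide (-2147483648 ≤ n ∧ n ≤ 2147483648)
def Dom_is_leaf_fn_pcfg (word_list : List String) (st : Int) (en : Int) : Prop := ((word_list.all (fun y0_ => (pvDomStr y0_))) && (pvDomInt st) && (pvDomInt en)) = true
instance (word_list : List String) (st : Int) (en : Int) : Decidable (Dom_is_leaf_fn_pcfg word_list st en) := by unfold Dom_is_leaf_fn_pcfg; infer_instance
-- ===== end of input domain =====

-- B replaces A's index-aware per-word predicate by an aggregate formulation: a length
-- maximum over the slice, then the SET of comma-carrying positions tested for inclusion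
-- in the allowed set {0, en - st}; objective: alternative (same cost, different strategy).

-- ===== PORT A =====
def is_leaf_fn_pcfg (word_list : List String) (st : Int) (en : Int) : Bool :=
  if st = en then true
  else
    (PySem.List.enumerate (PySem.List.slice word_list (some st) (some (en + 1)))).all
      (fun p =>
        if ¬ (p.1 = 0 ∨ p.1 = en - st) then
          decide (PySem.Str.len p.2 ≤ 3) && !(PySem.Str.isIn "," p.2)
        else
          decide (PySem.Str.len p.2 ≤ 3))

-- ===== PORT B =====
def is_leaf_fn_pcfg_alt (word_list : List String) (st : Int) (en : Int) : Bool :=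
  if st = en then true
  else
    let words := PySem.List.slice word_list (some st) (some (en + 1))
    if 3 < PySem.List.maxD (words.map PySem.Str.len) (fun x => x) 0 then false
    else
      PySem.Set.issubset
        (PySem.Set.ofList
          (((PySem.List.enumerate words).filter (fun p => PySem.Str.isIn "," p.2)).map (fun p => p.1)))
        (PySem.Set.ofList [0, en - st])

-- ===== PRECONDITION & SPEC =====
def Spec_is_leaf_fn_pcfg (word_list : List String) (st : Int) (en : Int) (out : Bool) : Prop := out = is_leaf_fn_pcfg_alt word_list st en
instance (word_list : List String) (st : Int) (en : Int) (out : Bool) : Decidable (Spec_is_leaf_fn_pcfg word_list st en out) := by unfold Spec_is_leaf_fn_pcfg; infer_instance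

-- ===== CLAIM (what is proved, stated in full; the proofs are below) =====
def Claim_equal_is_leaf_fn_pcfg : Prop := ∀ (word_list : List String) (st : Int) (en : Int), Dom_is_leaf_fn_pcfg word_list st en → Spec_is_leaf_fn_pcfg word_list st en (is_leaf_fn_pcfg word_list st en)

-- ===== LEMMAS AND PROOFS =====

-- max(l, default=d) ≤ c iff d ≤ c (empty case) and every element is ≤ c.
theorem pvMaxDLe (l : List Int) (c d : Int) :
    PySem.List.maxD l (fun x => x) d ≤ c ↔ ((l = [] → d ≤ c) ∧ ∀ x ∈ l, x ≤ c) := by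
  cases l with
  | nil => simp [PySem.List.maxD, PySem.List.max?]
  | cons x t =>
    unfold PySem.List.maxD
    rw [PySem.List.max?_id_cons]
    have h1 := PySem.List.le_foldl_max t x
    have h2 := PySem.List.foldl_max_mem t x
    constructor
    · intro h
      refine ⟨by simp, fun y hy => ?_⟩
      rcases List.mem_cons.1 hy with rfl | hyt
      · exact le_trans h1.1 h
      · exact le_trans (h1.2 y hyt) h
    · intro ⟨_, hall⟩
      simp only [Option.getD_some]
      rcases h2 with he | hm
      · rw [he]; exact hall x (by simp)
      · exact hall _ (List.mem_cons_of_mem _ hm)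

-- A's per-word test, pointwise.
theorem pvArg (st en i : Int) (w : String) :
    ((if ¬ (i = 0 ∨ i = en - st) then
        decide (PySem.Str.len w ≤ 3) && !(PySem.Str.isIn "," w)
      else decide (PySem.Str.len w ≤ 3)) = true) ↔
      (PySem.Str.len w ≤ 3 ∧ (PySem.Str.isIn "," w = true → (i = 0 ∨ i = en - st))) := by
  by_cases hc : i = 0 ∨ i = en - st
  · rw [if_neg (by tauto)]
    simp only [decide_eq_true_eq]
    exact ⟨fun hp => ⟨hp, fun _ => hc⟩, fun hp => hp.1⟩
  · rw [if_pos hc]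
    simp only [Bool.and_eq_true, decide_eq_true_eq, Bool.not_eq_true']
    constructor
    · intro hp
      exact ⟨hp.1, fun hcomma => absurd hcomma (by rw [hp.2]; simp)⟩
    · intro hp
      refine ⟨hp.1, ?_⟩
      cases hcm : PySem.Str.isIn "," w
      · rfl
      · exact absurd (hp.2 hcm) hc

-- B = true iff the two aggregate conditions hold, stated over enumerate.
theorem pvBChar (word_list : List String) (st en : Int) (h : st ≠ en) :
    is_leaf_fn_pcfg_alt word_list st en = true ↔
      ((∀ p ∈ PySem.List.enumerate (PySem.List.slice word_list (some st) (some (en + 1))) 0,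
          PySem.Str.len p.2 ≤ 3) ∧
       (∀ p ∈ PySem.List.enumerate (PySem.List.slice word_list (some st) (some (en + 1))) 0,
          PySem.Str.isIn "," p.2 = true → (p.1 = 0 ∨ p.1 = en - st))) := by
  unfold is_leaf_fn_pcfg_alt
  rw [if_neg h]
  set ws := PySem.List.slice word_list (some st) (some (en + 1)) with hws
  have hlen : (∀ p ∈ PySem.List.enumerate ws 0, PySem.Str.len p.2 ≤ 3) ↔
      ¬ 3 < PySem.List.maxD (ws.map PySem.Str.len) (fun x => x) 0 := by
    rw [not_lt, pvMaxDLe]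
    constructor
    · intro hall
      refine ⟨fun _ => by norm_num, fun x hx => ?_⟩
      obtain ⟨w, hw, rfl⟩ := List.mem_map.1 hx
      obtain ⟨k, hk, rfl⟩ := List.mem_iff_getElem.1 hw
      exact hall ((0 : Int) + k, ws[k]) ((PySem.List.mem_enumerate_iff ws 0 _).2 ⟨k, hk, rfl⟩)
    · intro ⟨_, hall⟩ p hp
      obtain ⟨k, hk, rfl⟩ := (PySem.List.mem_enumerate_iff ws 0 p).1 hp
      exact hall (PySem.Str.len ws[k]) (List.mem_map.2 ⟨ws[k], List.getElem_mem hk, rfl⟩)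
  by_cases hmax : 3 < PySem.List.maxD (ws.map PySem.Str.len) (fun x => x) 0
  · rw [if_pos hmax]
    simp only [Bool.false_eq_true, false_iff]
    intro hcontra
    exact (hlen.1 hcontra.1) hmax
  · rw [if_neg hmax]
    rw [PySem.Set.issubset_iff]
    constructor
    · intro hsub
      refine ⟨hlen.2 hmax, fun p hp hcomma => ?_⟩
      have hm : p.1 ∈ PySem.Set.ofList
          (((PySem.List.enumerate ws 0).filter (fun q => PySem.Str.isIn "," q.2)).map (fun q => q.1)) := by
        rw [PySem.Set.mem_ofList]
        exact List.mem_map.2 ⟨p, List.mem_filter.2 ⟨hp, hcomma⟩, rfl⟩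
      have := hsub p.1 hm
      rw [PySem.Set.mem_ofList] at this
      simpa using this
    · intro ⟨_, hcom⟩ i hi
      rw [PySem.Set.mem_ofList] at hi ⊢
      obtain ⟨p, hp, rfl⟩ := List.mem_map.1 hi
      have hpf := List.mem_filter.1 hp
      have := hcom p hpf.1 (by simpa using hpf.2)
      simpa using this

-- ===== VERDICT (by name: the statement is the Claim_ definition above) =====
theorem is_leaf_fn_pcfg_spec : Claim_equal_is_leaf_fn_pcfg := by
  intro word_list st en _
  unfold Spec_is_leaf_fn_pcfg
  by_cases hse : st = en
  · simp [is_leaf_fn_pcfg, is_leaf_fn_pcfg_alt, hse]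
  · rw [Bool.eq_iff_iff, pvBChar word_list st en hse]
    unfold is_leaf_fn_pcfg
    rw [if_neg hse, List.all_eq_true]
    constructor
    · intro hall
      exact ⟨fun p hp => ((pvArg st en p.1 p.2).1 (hall p hp)).1,
             fun p hp => ((pvArg st en p.1 p.2).1 (hall p hp)).2⟩
    · intro ⟨h1, h2⟩ p hp
      exact (pvArg st en p.1 p.2).2 ⟨h1 p hp, h2 p hp⟩
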